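-- pv_equiv track=rewrite | github.com/Ewrzqi/Nyoba-icikiwir | tumbal.py | bruteforce_rot
-- ===== SOURCE A (Python) =====
-- def bruteforce_rot(txt):
--     results = []
--     for key in range(1, 26):
--         rotate = str.maketrans(
--             'ABCDEFGHIJKLMNOPQRSTUVWXYZabcdefghijklmnopqrstuvwxyz0123456789',
--             ''.join(chr((ord(char) - key - 65) % 26 + 65) if char.isupper() else
--                     chr((ord(char) - key - 97) % 26 + 97) if char.islower() else
--                     chr((ord(char) - key - 48) % 10 + 48) if char.isnumeric() else char
--                     for char in 'ABCDEFGHIJKLMNOPQRSTUVWXYZabcdefghijklmnopqrstuvwxyz0123456789')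
--         )
--         results.append(f"Key {key}: {txt.translate(rotate)}")
--     return results
-- ===== SOURCE B (Python) =====
-- def bruteforce_rot(txt):
--     def shift1(c):
--         o = ord(c)
--         if 65 <= o <= 90:
--             return chr(90 if o == 65 else o - 1)
--         if 97 <= o <= 122:
--             return chr(122 if o == 97 else o - 1)
--         if 48 <= o <= 57:
--             return chr(57 if o == 48 else o - 1)
--         return c
--     results = []
--     cur = txt
--     for key in range(1, 26):
--         cur = ''.join(map(shift1, cur))
--         results.append(f"Key {key}: {cur}")
--     return results
-- ===== Notes on version B (the rewrite author's own statement) =====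
-- stated objective: alternative
-- what changed: Instead of rebuilding a 62-entry str.maketrans translation table for every key and translating the original text through it, B keeps the previously shifted text and derives each key's result by shifting every character of it back by one place within its ASCII class (A-Z, a-z, 0-9), prepending the same key label.
import Mathlib
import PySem

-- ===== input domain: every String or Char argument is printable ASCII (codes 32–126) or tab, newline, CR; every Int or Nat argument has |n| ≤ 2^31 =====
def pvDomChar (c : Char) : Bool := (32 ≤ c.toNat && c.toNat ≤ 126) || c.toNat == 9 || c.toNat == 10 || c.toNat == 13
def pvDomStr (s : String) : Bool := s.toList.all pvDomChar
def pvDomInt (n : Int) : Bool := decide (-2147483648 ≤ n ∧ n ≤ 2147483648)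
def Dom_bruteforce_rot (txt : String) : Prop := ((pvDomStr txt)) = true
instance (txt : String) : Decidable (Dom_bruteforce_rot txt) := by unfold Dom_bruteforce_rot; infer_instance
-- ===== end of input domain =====

-- B replaces A's per-key str.maketrans translation table by iterated per-character
-- shift-by-one of the previous key's text (alternative decomposition; no speed claim).

-- ===== PORT A =====
def pvRotSrc : List Char := "ABCDEFGHIJKLMNOPQRSTUVWXYZabcdefghijklmnopqrstuvwxyz0123456789".toList

-- the generator's char.isupper()/islower()/isnumeric() run only over the 62 ASCII source
-- chars, where they are exactly these code-range checks (exact on that domain)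
def pvRotCharA (key : Int) (c : Char) : Char :=
  if 65 ≤ c.toNat ∧ c.toNat ≤ 90 then
    Char.ofNat (PySem.Int.mod ((c.toNat : Int) - key - 65) 26 + 65).toNat
  else if 97 ≤ c.toNat ∧ c.toNat ≤ 122 then
    Char.ofNat (PySem.Int.mod ((c.toNat : Int) - key - 97) 26 + 97).toNat
  else if 48 ≤ c.toNat ∧ c.toNat ≤ 57 then
    Char.ofNat (PySem.Int.mod ((c.toNat : Int) - key - 48) 10 + 48).toNat
  else c

-- str.maketrans(src, tgt): mapping built pairwise from src to tgt (tgt = the joined generator)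
def pvMakeTrans (key : Int) : PySem.Dict Char Char :=
  (pvRotSrc.zip (pvRotSrc.map (pvRotCharA key))).foldl (fun d p => d.insert p.1 p.2) PySem.Dict.empty

-- txt.translate(rotate): each char looked up in the table, unchanged when absent
def bruteforce_rot (txt : String) : List String :=
  (PySem.List.pyRange 1 26 1).foldl
    (fun results key =>
      results ++ ["Key " ++ PySem.Int.toStr key ++ ": " ++
        String.mk (txt.toList.map (fun c => (pvMakeTrans key).getD c c))])
    []

-- ===== PORT B =====
def pvShift1 (c : Char) : Char :=
  if 65 ≤ c.toNat ∧ c.toNat ≤ 90 then Char.ofNat (if c.toNat = 65 then 90 else c.toNat - 1)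
  else if 97 ≤ c.toNat ∧ c.toNat ≤ 122 then Char.ofNat (if c.toNat = 97 then 122 else c.toNat - 1)
  else if 48 ≤ c.toNat ∧ c.toNat ≤ 57 then Char.ofNat (if c.toNat = 48 then 57 else c.toNat - 1)
  else c

-- the for-loop over range(1, 26) carrying (results, cur); results built by cons
def pvLoopB : Nat → Int → List Char → List String
  | 0, _, _ => []
  | n+1, key, cur =>
    let cur' := cur.map pvShift1
    ("Key " ++ PySem.Int.toStr key ++ ": " ++ String.mk cur') :: pvLoopB n (key + 1) cur'

def bruteforce_rot_alt (txt : String) : List String := pvLoopB 25 1 txt.toList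

-- ===== PRECONDITION & SPEC =====
def Spec_bruteforce_rot (txt : String) (out : List String) : Prop := out = bruteforce_rot_alt txt
instance (txt : String) (out : List String) : Decidable (Spec_bruteforce_rot txt out) := by unfold Spec_bruteforce_rot; infer_instance

-- ===== CLAIM (what is proved, stated in full; the proofs are below) =====
def Claim_equal_bruteforce_rot : Prop := ∀ (txt : String), Dom_bruteforce_rot txt → Spec_bruteforce_rot txt (bruteforce_rot txt)

-- ===== LEMMAS AND PROOFS =====
theorem pvToNat_ofNat (n : Nat) (h : n < 55296) : (Char.ofNat n).toNat = n := by
  have hv : n.isValidChar := Or.inl h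
  simp [Char.ofNat, hv, Char.ofNatAux, Char.toNat]

theorem pvMod_eq (a b : Int) (h : 0 ≤ b) : PySem.Int.mod a b = a % b := by
  simp [PySem.Int.mod, Int.fmod_eq_emod, h]

theorem pvGetD_fold (f : Char → Char) (l : List Char) :
    ∀ (d : PySem.Dict Char Char) (c : Char),
    ((l.zip (l.map f)).foldl (fun d p => d.insert p.1 p.2) d).getD c c
      = if c ∈ l then f c else d.getD c c := by
  induction l with
  | nil => intro d c; simp
  | cons a l ih =>
    intro d c
    simp only [List.map_cons, List.zip_cons_cons, List.foldl_cons]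
    rw [ih, PySem.Dict.getD_insert]
    by_cases hmem : c ∈ l
    · simp [hmem]
    · by_cases hca : c = a <;> simp [hmem, hca]

set_option maxRecDepth 10000 in
theorem pvMem_src (c : Char)
    (h : (65 ≤ c.toNat ∧ c.toNat ≤ 90) ∨ (97 ≤ c.toNat ∧ c.toNat ≤ 122) ∨ (48 ≤ c.toNat ∧ c.toNat ≤ 57)) :
    c ∈ pvRotSrc := by
  have key : ∀ n ∈ List.range 123,
      ((65 ≤ n ∧ n ≤ 90) ∨ (97 ≤ n ∧ n ≤ 122) ∨ (48 ≤ n ∧ n ≤ 57)) → Char.ofNat n ∈ pvRotSrc := by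
    decide
  have hn : c.toNat ∈ List.range 123 := by
    rw [List.mem_range]; omega
  have := key c.toNat hn (by omega)
  rwa [Char.ofNat_toNat] at this

theorem pvTbl_eq (key : Int) (c : Char) : (pvMakeTrans key).getD c c = pvRotCharA key c := by
  unfold pvMakeTrans
  rw [pvGetD_fold]
  by_cases h : c ∈ pvRotSrc
  · simp [h]
  · simp only [h, if_false, PySem.Dict.getD_empty]
    unfold pvRotCharA
    split_ifs with h1 h2 h3
    · exact absurd (pvMem_src c (Or.inl h1)) h
    · exact absurd (pvMem_src c (Or.inr (Or.inl h2))) h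
    · exact absurd (pvMem_src c (Or.inr (Or.inr h3))) h
    · rfl

theorem pvRotCharA_zero (c : Char) : pvRotCharA 0 c = c := by
  unfold pvRotCharA
  split_ifs with h1 h2 h3
  · rw [pvMod_eq _ _ (by norm_num)]
    have he : (((c.toNat : Int)) - 0 - 65) % 26 + 65 = (c.toNat : Int) := by omega
    rw [he, Int.toNat_natCast, Char.ofNat_toNat]
  · rw [pvMod_eq _ _ (by norm_num)]
    have he : (((c.toNat : Int)) - 0 - 97) % 26 + 97 = (c.toNat : Int) := by omega
    rw [he, Int.toNat_natCast, Char.ofNat_toNat]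
  · rw [pvMod_eq _ _ (by norm_num)]
    have he : (((c.toNat : Int)) - 0 - 48) % 10 + 48 = (c.toNat : Int) := by omega
    rw [he, Int.toNat_natCast, Char.ofNat_toNat]
  · rfl

theorem pvShift1_rot (k : Int) (c : Char) :
    pvShift1 (pvRotCharA k c) = pvRotCharA (k + 1) c := by
  unfold pvRotCharA
  split_ifs with h1 h2 h3
  · rw [pvMod_eq _ _ (by norm_num), pvMod_eq _ _ (by norm_num)]
    set m : Int := ((c.toNat : Int) - k - 65) % 26 + 65 with hm
    have ht : (Char.ofNat m.toNat).toNat = m.toNat := pvToNat_ofNat _ (by omega)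
    unfold pvShift1
    simp only [ht]
    have hcond : 65 ≤ m.toNat ∧ m.toNat ≤ 90 := ⟨by omega, by omega⟩
    rw [if_pos hcond]
    congr 1
    rw [hm]
    split_ifs with h <;> omega
  · rw [pvMod_eq _ _ (by norm_num), pvMod_eq _ _ (by norm_num)]
    set m : Int := ((c.toNat : Int) - k - 97) % 26 + 97 with hm
    have ht : (Char.ofNat m.toNat).toNat = m.toNat := pvToNat_ofNat _ (by omega)
    unfold pvShift1
    simp only [ht]
    have hno : ¬ (65 ≤ m.toNat ∧ m.toNat ≤ 90) := by omega
    have hcond : 97 ≤ m.toNat ∧ m.toNat ≤ 122 := ⟨by omega, by omega⟩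
    rw [if_neg hno, if_pos hcond]
    congr 1
    rw [hm]
    split_ifs with h <;> omega
  · rw [pvMod_eq _ _ (by norm_num), pvMod_eq _ _ (by norm_num)]
    set m : Int := ((c.toNat : Int) - k - 48) % 10 + 48 with hm
    have ht : (Char.ofNat m.toNat).toNat = m.toNat := pvToNat_ofNat _ (by omega)
    unfold pvShift1
    simp only [ht]
    have hno1 : ¬ (65 ≤ m.toNat ∧ m.toNat ≤ 90) := by omega
    have hno2 : ¬ (97 ≤ m.toNat ∧ m.toNat ≤ 122) := by omega
    have hcond : 48 ≤ m.toNat ∧ m.toNat ≤ 57 := ⟨by omega, by omega⟩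
    rw [if_neg hno1, if_neg hno2, if_pos hcond]
    congr 1
    rw [hm]
    split_ifs with h <;> omega
  · unfold pvShift1
    rw [if_neg h1, if_neg h2, if_neg h3]

theorem pvMap_shift (k : Int) (l : List Char) :
    (l.map (pvRotCharA k)).map pvShift1 = l.map (pvRotCharA (k + 1)) := by
  rw [List.map_map]
  congr 1
  funext c
  exact pvShift1_rot k c

set_option maxRecDepth 10000 in
theorem pvLoopB_eq (l : List Char) :
    ∀ (n k : Nat),
    pvLoopB n ((k : Int) + 1) (l.map (pvRotCharA (k : Int))) =
    (PySem.List.pyRange ((k : Int) + 1) ((k : Int) + 1 + (n : Int)) 1).map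
      (fun key => "Key " ++ PySem.Int.toStr key ++ ": " ++
        String.mk (l.map (fun c => (pvMakeTrans key).getD c c))) := by
  intro n
  induction n with
  | zero =>
    intro k
    rw [PySem.List.pyRange_one_eq_nil (by omega : ((k : Int) + 1 + ((0 : Nat) : Int)) ≤ (k : Int) + 1)]
    rfl
  | succ n ih =>
    intro k
    rw [PySem.List.pyRange_one_cons (by push_cast; omega : ((k : Int) + 1) < (k : Int) + 1 + (((n : Nat) + 1 : Nat) : Int))]
    have hstep : pvLoopB (n + 1) ((k : Int) + 1) (l.map (pvRotCharA (k : Int))) =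
        ("Key " ++ PySem.Int.toStr ((k : Int) + 1) ++ ": " ++
          String.mk ((l.map (pvRotCharA (k : Int))).map pvShift1)) ::
        pvLoopB n ((k : Int) + 1 + 1) ((l.map (pvRotCharA (k : Int))).map pvShift1) := rfl
    rw [hstep, List.map_cons, pvMap_shift]
    have hc : (((k + 1 : Nat) : Int)) = ((k : Int) + 1) := by push_cast; ring
    have htail := ih (k + 1)
    rw [hc] at htail
    have he : ((k : Int) + 1 + 1 + ((n : Nat) : Int)) = ((k : Int) + 1 + (((n : Nat) + 1 : Nat) : Int)) := by
      push_cast; ring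
    rw [he] at htail
    rw [htail]
    simp only [pvTbl_eq]
theorem pvMap_rot_zero (l : List Char) : l.map (pvRotCharA 0) = l := by
  have : pvRotCharA 0 = fun c => c := funext pvRotCharA_zero
  rw [this, List.map_id']

-- ===== VERDICT (by name: the statement is the Claim_ definition above) =====
theorem bruteforce_rot_spec : Claim_equal_bruteforce_rot := by
  intro txt _
  unfold Spec_bruteforce_rot bruteforce_rot bruteforce_rot_alt
  rw [PySem.List.foldl_append_singleton_eq_map]
  have h := pvLoopB_eq txt.toList 25 0
  norm_num at h
  rw [pvMap_rot_zero] at h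
  rw [List.nil_append, h]
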